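-- pv_equiv track=rewrite | github.com/anupyadav27/threat-engine | engines/secops/scanner_engine/azure_scanner/arm_logic_implementations.py | _is_arm_function_expression
-- ===== SOURCE A (Python) =====
-- def _is_arm_function_expression(value):
--     """Check if a string value is an ARM template function expression."""
--
--     if not isinstance(value, str) or len(value) < 3:
--         return False
--
--     # ARM template expressions are wrapped in square brackets
--     if not (value.startswith('[') and value.endswith(']')):
--         return False
--
--     # Extract the function content (remove brackets)
--     func_content = value[1:-1].strip()
--
--     # Check for common ARM template functions
--     arm_functions = [
--         'parameters(',
--         'variables(',
--         'reference(',
--         'resourceId(',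
--         'concat(',
--         'listKeys(',
--         'listSecrets(',
--         'subscription(',
--         'resourceGroup(',
--         'deployment(',
--         'environment(',
--         'tenant(',
--         'uniqueString(',
--         'guid(',
--         'uri(',
--         'base64(',
--         'dataUriToString(',
--         'length(',
--         'indexOf(',
--         'lastIndexOf(',
--         'replace(',
--         'split(',
--         'string(',
--         'int(',
--         'float(',
--         'bool(',
--         'json(',
--         'add(',
--         'sub(',
--         'mul(',
--         'div(',
--         'mod(',
--         'min(',
--         'max(',
--         'range(',
--         'base64ToString(',
--         'uriComponent(',
--         'uriComponentToString('
--     ]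
--
--     # Check if the expression starts with any ARM function
--     func_content_lower = func_content.lower()
--     for arm_func in arm_functions:
--         if func_content_lower.startswith(arm_func.lower()):
--             return True
--
--     return False
-- ===== SOURCE B (Python) =====
-- # B: instead of scanning 38 'name(' prefixes with startswith, walk the bracket
-- # content character by character, accumulating the function-name token until the
-- # first '(' and answering with one membership test in a name set built from a
-- # single whitespace-separated string.
-- _ARM_NAMES = frozenset(
--     "parameters variables reference resourceid concat listkeys listsecrets "
--     "subscription resourcegroup deployment environment tenant uniquestring "
--     "guid uri base64 datauritostring length indexof lastindexof replace "
--     "split string int float bool json add sub mul div mod min max range "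
--     "base64tostring uricomponent uricomponenttostring".split()
-- )
--
--
-- def _is_arm_function_expression(value):
--     """Check if a string value is an ARM template function expression."""
--     if not isinstance(value, str):
--         return False
--     if len(value) < 3 or value[0] != '[' or value[-1] != ']':
--         return False
--     name = []
--     for ch in value[1:-1].strip():
--         if ch == '(':
--             return ''.join(name).lower() in _ARM_NAMES
--         name.append(ch)
--     return False
-- ===== Notes on version B (the rewrite author's own statement) =====
-- stated objective: idiomatic
-- what changed: A tests the content against all 38 function-name prefixes with startswith over a per-call list; B walks the bracket content once, accumulating the function-name token up to the first opening parenthesis and answering with a single membership test in a module-level frozenset built from one whitespace-separated string.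
import Mathlib
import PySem

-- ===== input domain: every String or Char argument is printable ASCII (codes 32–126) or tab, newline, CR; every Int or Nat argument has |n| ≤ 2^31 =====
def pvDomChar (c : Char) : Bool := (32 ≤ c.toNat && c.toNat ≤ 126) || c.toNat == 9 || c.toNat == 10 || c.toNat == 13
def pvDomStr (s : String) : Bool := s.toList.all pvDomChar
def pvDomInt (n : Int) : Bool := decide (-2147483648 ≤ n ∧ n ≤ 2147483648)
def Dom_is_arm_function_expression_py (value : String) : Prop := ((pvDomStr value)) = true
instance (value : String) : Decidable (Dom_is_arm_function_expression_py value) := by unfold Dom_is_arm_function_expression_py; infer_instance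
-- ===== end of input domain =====

-- B replaces A's startswith-scan over 38 function-name prefixes by a single character walk that
-- accumulates the name token up to the first opening parenthesis and tests it once against a
-- name set built from one whitespace-separated string (objective: idiomatic).

-- ===== PORT A =====
def armFunctions : List (List Char) :=
  ["parameters(".toList, "variables(".toList, "reference(".toList, "resourceId(".toList,
   "concat(".toList, "listKeys(".toList, "listSecrets(".toList, "subscription(".toList,
   "resourceGroup(".toList, "deployment(".toList, "environment(".toList, "tenant(".toList,
   "uniqueString(".toList, "guid(".toList, "uri(".toList, "base64(".toList,
   "dataUriToString(".toList, "length(".toList, "indexOf(".toList, "lastIndexOf(".toList,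
   "replace(".toList, "split(".toList, "string(".toList, "int(".toList, "float(".toList,
   "bool(".toList, "json(".toList, "add(".toList, "sub(".toList, "mul(".toList,
   "div(".toList, "mod(".toList, "min(".toList, "max(".toList, "range(".toList,
   "base64ToString(".toList, "uriComponent(".toList, "uriComponentToString(".toList]

def is_arm_function_expression_py (value : String) : Bool :=
  if PySem.Str.len value < 3 then false
  else if !(PySem.Str.startswith value "[" && PySem.Str.endswith value "]") then false
  else
    let funcContent := PySem.Chars.strip (PySem.Chars.slice value.toList (some 1) (some (-1)))
    let funcContentLower := PySem.Chars.lower funcContent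
    -- for arm_func in arm_functions: if startswith: return True; return False
    armFunctions.any (fun armFunc => PySem.Chars.startswith funcContentLower (PySem.Chars.lower armFunc))

-- ===== PORT B =====
-- the module-level frozenset("… ".split()) of Source B
def armNameWords : List Char :=
  ("parameters variables reference resourceid concat listkeys listsecrets subscription resourcegroup deployment environment tenant uniquestring guid uri base64 datauritostring length indexof lastindexof replace split string int float bool json add sub mul div mod min max range base64tostring uricomponent uricomponenttostring").toList

def armNameSet : PySem.Set (List Char) := PySem.Set.ofList (PySem.Chars.split₀ armNameWords)

-- the 'for ch in content: if ch == '(' : return join(name).lower() in set; name.append(ch)' loop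
def scanArm (name : List Char) : List Char → Bool
  | [] => false
  | c :: rest =>
    if c = '(' then PySem.Set.contains armNameSet (PySem.Chars.lower name)
    else scanArm (name ++ [c]) rest

def is_arm_function_expression_py_alt (value : String) : Bool :=
  let vs := value.toList
  if vs.length < 3 || !(PySem.Chars.pyGet? vs 0 == some '[') || !(PySem.Chars.pyGet? vs (-1) == some ']') then
    false
  else
    scanArm [] (PySem.Chars.strip (PySem.Chars.slice vs (some 1) (some (-1))))

-- ===== PRECONDITION & SPEC =====
def Spec_is_arm_function_expression_py (value : String) (out : Bool) : Prop := out = is_arm_function_expression_py_alt value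
instance (value : String) (out : Bool) : Decidable (Spec_is_arm_function_expression_py value out) := by unfold Spec_is_arm_function_expression_py; infer_instance

-- ===== CLAIM (what is proved, stated in full; the proofs are below) =====
def Claim_equal_is_arm_function_expression_py : Prop := ∀ (value : String), Dom_is_arm_function_expression_py value → Spec_is_arm_function_expression_py value (is_arm_function_expression_py value)

-- ===== LEMMAS AND PROOFS =====

def armNames : List (List Char) := PySem.Chars.split₀ armNameWords

-- a 'name(' prefix (no '(' inside the name) is exactly: a '(' occurs, and the text before the first '(' is the name
lemma prefix_paren (n f : List Char) (h : '(' ∉ n) :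
    (n ++ ['(']) <+: f ↔ ('(' ∈ f ∧ f.takeWhile (· != '(') = n) := by
  induction n generalizing f with
  | nil =>
    cases f with
    | nil => simp
    | cons c t =>
      by_cases hc : c = '('
      · subst hc; simp [List.cons_prefix_cons, List.takeWhile]
      · have hb : (c != '(') = true := by simpa using hc
        simp [List.cons_prefix_cons, List.takeWhile, hb]
        exact fun e => hc e.symm
  | cons a n' ih =>
    have ha : a ≠ '(' := fun e => h (e ▸ List.mem_cons_self ..)
    have h' : '(' ∉ n' := fun e => h (List.mem_cons_of_mem _ e)
    cases f with
    | nil => simp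
    | cons c t =>
      by_cases hc : c = '('
      · subst hc
        simp only [List.takeWhile]
        simp only [show ('(' != '(') = false from rfl]
        simp [ha]
      · simp only [List.cons_append, List.cons_prefix_cons, List.mem_cons, List.takeWhile,
          show (c != '(') = true from by simpa using hc]
        rw [ih t h']
        constructor
        · rintro ⟨rfl, hp, hw⟩; exact ⟨Or.inr hp, by simp [hw]⟩
        · rintro ⟨hm, hw⟩
          simp only [List.cons.injEq] at hw
          rcases hm with rfl | hm
          · exact absurd rfl hc
          · exact ⟨hw.1.symm, hm, hw.2⟩

set_option maxRecDepth 40000 in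
lemma map_lower_armFunctions : armFunctions.map PySem.Chars.lower = armNames.map (· ++ ['(']) := by
  decide

set_option maxRecDepth 40000 in
lemma no_paren_in_names : ∀ n ∈ armNames, '(' ∉ n := by decide

set_option maxRecDepth 40000 in
lemma armNameSet_eq : armNameSet = armNames := by decide

-- lowercasing maps '(' to itself and nothing else to '('
lemma lowerChar_paren (x : Char) : PySem.Chars.lowerChar x = '(' ↔ x = '(' := by
  unfold PySem.Chars.lowerChar
  split_ifs with h
  · simp only [PySem.Chars.isupper, Bool.and_eq_true, decide_eq_true_eq] at h
    obtain ⟨h1, h2⟩ := h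
    rw [Char.le_def] at h1 h2
    have h1' : 65 ≤ x.toNat := h1
    have h2' : x.toNat ≤ 90 := h2
    constructor
    · intro he
      exfalso
      have hv : (x.toNat + 32).isValidChar := by left; omega
      have ht : (Char.ofNat (x.toNat + 32)).toNat = x.toNat + 32 := by simp [Char.ofNat, hv]
      rw [he] at ht
      have h40 : ('(' : Char).toNat = 40 := by decide
      omega
    · intro he; subst he; exact absurd h1' (by decide)
  · exact Iff.rfl

lemma mem_paren_lower (c : List Char) : '(' ∈ PySem.Chars.lower c ↔ '(' ∈ c := by
  show '(' ∈ c.map PySem.Chars.lowerChar ↔ '(' ∈ c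
  simp only [List.mem_map]
  constructor
  · rintro ⟨x, hx, he⟩; exact ((lowerChar_paren x).mp he) ▸ hx
  · intro h; exact ⟨'(', h, rfl⟩

lemma takeWhile_lower (c : List Char) :
    (PySem.Chars.lower c).takeWhile (· != '(') = PySem.Chars.lower (c.takeWhile (· != '(')) := by
  show (c.map PySem.Chars.lowerChar).takeWhile (· != '(') = (c.takeWhile (· != '(')).map PySem.Chars.lowerChar
  rw [List.takeWhile_map]
  have hp : ((fun x => x != '(') ∘ PySem.Chars.lowerChar) = (fun x : Char => x != '(') := by
    funext x
    rw [Bool.eq_iff_iff]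
    simp only [Function.comp, bne_iff_ne, ne_eq]
    rw [lowerChar_paren]
  rw [hp]

-- the B loop computes: a '(' occurs, and the lowered accumulated token is in the set
lemma scanArm_eq (c : List Char) (acc : List Char) :
    scanArm acc c = (decide ('(' ∈ c) && PySem.Set.contains armNameSet
      (PySem.Chars.lower (acc ++ c.takeWhile (· != '(')))) := by
  induction c generalizing acc with
  | nil => simp [scanArm]
  | cons d rest ih =>
    by_cases hd : d = '('
    · subst hd
      simp [scanArm, List.takeWhile]
    · have hb : (d != '(') = true := by simpa using hd
      simp only [scanArm, if_neg hd, List.mem_cons, List.takeWhile, hb]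
      rw [ih]
      have : acc ++ d :: rest.takeWhile (· != '(') = (acc ++ [d]) ++ rest.takeWhile (· != '(') := by
        simp
      rw [this]
      congr 1
      simp [hd, eq_comm]

set_option maxRecDepth 40000 in
set_option maxHeartbeats 2000000 in
lemma contains_eq_mem (x : List Char) :
    PySem.Set.contains armNameSet x = decide (x ∈ armNames) := by
  rw [armNameSet_eq]
  exact List.contains_eq_mem x armNames

-- A's scan over prefixes equals B's loop, on the same (raw) content
lemma scan_eq_loop (c : List Char) :
    armFunctions.any (fun armFunc =>
        PySem.Chars.startswith (PySem.Chars.lower c) (PySem.Chars.lower armFunc))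
      = scanArm [] c := by
  rw [scanArm_eq, List.nil_append, contains_eq_mem, ← takeWhile_lower]
  have h1 : armFunctions.any (fun armFunc =>
        PySem.Chars.startswith (PySem.Chars.lower c) (PySem.Chars.lower armFunc))
      = armNames.any (fun n => PySem.Chars.startswith (PySem.Chars.lower c) (n ++ ['('])) := by
    rw [show (fun armFunc => PySem.Chars.startswith (PySem.Chars.lower c) (PySem.Chars.lower armFunc))
          = (fun p => PySem.Chars.startswith (PySem.Chars.lower c) p) ∘ PySem.Chars.lower from rfl,
        ← List.any_map, map_lower_armFunctions, List.any_map]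
    rfl
  rw [h1, Bool.eq_iff_iff]
  simp only [List.any_eq_true, Bool.and_eq_true, decide_eq_true_eq, PySem.Chars.startswith_iff]
  constructor
  · rintro ⟨n, hn, hp⟩
    have := (prefix_paren n _ (no_paren_in_names n hn)).mp hp
    exact ⟨(mem_paren_lower c).mp this.1, this.2 ▸ hn⟩
  · rintro ⟨hmem, hw⟩
    exact ⟨_, hw, (prefix_paren _ _ (no_paren_in_names _ hw)).mpr ⟨(mem_paren_lower c).mpr hmem, rfl⟩⟩

lemma suffix_singleton_iff (l : List Char) (x : Char) : [x] <:+ l ↔ l.getLast? = some x := by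
  rw [List.getLast?_eq_some_iff]
  constructor
  · rintro ⟨u, rfl⟩; exact ⟨u, rfl⟩
  · rintro ⟨u, rfl⟩; exact ⟨u, rfl⟩

-- A's bracket guards equal B's index guards once len ≥ 3
lemma guards_eq (vs : List Char) (h : ¬ vs.length < 3) :
    (!(PySem.Chars.startswith vs "[".toList && PySem.Chars.endswith vs "]".toList))
      = (!(PySem.Chars.pyGet? vs 0 == some '[') || !(PySem.Chars.pyGet? vs (-1) == some ']')) := by
  obtain ⟨a, t, rfl⟩ : ∃ a t, vs = a :: t := by
    cases vs with
    | nil => simp at h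
    | cons a t => exact ⟨a, t, rfl⟩
  have hs : PySem.Chars.startswith (a :: t) "[".toList = (a == '[') := by
    rw [Bool.eq_iff_iff, PySem.Chars.startswith_iff]
    show ['['] <+: (a :: t) ↔ _
    rw [List.cons_prefix_cons]
    constructor
    · rintro ⟨he, -⟩; exact beq_iff_eq.mpr he.symm
    · intro hb; exact ⟨(beq_iff_eq.mp hb).symm, List.nil_prefix⟩
  have hg0 : PySem.Chars.pyGet? (a :: t) 0 = some a := by
    simp [PySem.Chars.pyGet?_eq_listPyGet?, PySem.List.pyGet?, PySem.List.pyIdx?]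
  have he : PySem.Chars.endswith (a :: t) "]".toList = ((a :: t).getLast? == some ']') := by
    rw [Bool.eq_iff_iff, PySem.Chars.endswith_iff]
    show [']'] <:+ (a :: t) ↔ _
    rw [suffix_singleton_iff]
    simp
  have hgl : PySem.Chars.pyGet? (a :: t) (-1) = (a :: t).getLast? := by
    simp only [PySem.Chars.pyGet?_eq_listPyGet?, PySem.List.pyGet?, PySem.List.pyIdx?]
    rw [if_neg (by omega), if_pos (by simp)]
    have h1 : ((a :: t).length - ((-(-1:Int)).toNat)) = (a :: t).length - 1 := by norm_num
    simp only [h1, Option.bind]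
    rw [List.getLast?_eq_getElem?]
  rw [hs, hg0, he, hgl]
  rcases Bool.eq_false_or_eq_true (a == '[') with h1 | h1 <;>
    rcases Bool.eq_false_or_eq_true ((a :: t).getLast? == some ']') with h2 | h2 <;>
      simp [h1, h2]

-- ===== VERDICT (by name: the statement is the Claim_ definition above) =====
theorem is_arm_function_expression_py_spec : Claim_equal_is_arm_function_expression_py := by
  intro value _
  unfold Spec_is_arm_function_expression_py is_arm_function_expression_py is_arm_function_expression_py_alt
  by_cases h3 : value.toList.length < 3
  · rw [if_pos (by simp only [PySem.Str.len]; omega),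
        if_pos (by simp only [h3, decide_true, Bool.true_or])]
  · rw [if_neg (by simp only [PySem.Str.len]; omega)]
    have hb : (decide (value.toList.length < 3)
          || !(PySem.Chars.pyGet? value.toList 0 == some '[')
          || !(PySem.Chars.pyGet? value.toList (-1) == some ']'))
        = (!(PySem.Chars.pyGet? value.toList 0 == some '[')
          || !(PySem.Chars.pyGet? value.toList (-1) == some ']')) := by
      have h3' : ¬ value.length < 3 := by rw [← String.length_toList]; exact h3
      simp [h3']
    simp only [hb]
    have hg := guards_eq value.toList h3
    simp only [PySem.Str.startswith_eq, PySem.Str.endswith_eq] at *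
    simp only [hg]
    split_ifs with hc
    · rfl
    · simp only [PySem.Chars.slice_eq_listSlice]
      exact scan_eq_loop _
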